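-- pv_equiv track=rewrite | github.com/lmarte17/athena | backend/adk-bidi/app/memory_v2/service.py | should_retrieve
-- ===== SOURCE A (Python) =====
-- def should_retrieve(query: str) -> bool:
--     lowered = query.lower()
--     trigger_words = (
--         "remember",
--         "recall",
--         "what happened",
--         "did we",
--         "when did",
--         "who",
--         "which project",
--         "preference",
--         "prefer",
--         "last time",
--         "my ",
--         "our ",
--     )
--     return any(marker in lowered for marker in trigger_words)
-- ===== SOURCE B (Python) =====
-- def should_retrieve(query: str) -> bool:
--     lowered = query.lower()
--     trigger_words = (
--         "remember|recall|what happened|did we|when did|who"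
--         "|which project|preference|prefer|last time|my |our "
--     ).split("|")
--     # single left-to-right scan: at each position, check whether some trigger word starts there
--     for i in range(len(lowered) + 1):
--         for w in trigger_words:
--             if lowered.startswith(w, i):
--                 return True
--     return False
-- ===== Notes on version B (the rewrite author's own statement) =====
-- stated objective: alternative
-- what changed: Replaces the per-word independent substring scans ('marker in lowered' for each word) with a single left-to-right scan over the lowered query that at each position checks whether any trigger word starts there.
import Mathlib
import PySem

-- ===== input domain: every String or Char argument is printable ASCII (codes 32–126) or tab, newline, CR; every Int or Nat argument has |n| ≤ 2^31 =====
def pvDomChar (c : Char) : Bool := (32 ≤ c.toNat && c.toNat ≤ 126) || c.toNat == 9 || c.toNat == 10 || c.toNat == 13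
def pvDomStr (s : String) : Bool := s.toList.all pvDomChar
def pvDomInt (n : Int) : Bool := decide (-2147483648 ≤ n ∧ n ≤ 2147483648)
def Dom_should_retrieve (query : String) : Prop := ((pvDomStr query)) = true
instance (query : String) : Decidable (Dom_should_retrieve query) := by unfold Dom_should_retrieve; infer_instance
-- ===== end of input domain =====

-- B replaces per-word substring scans by one left-to-right scan checking at each position
-- whether some trigger word starts there (objective: alternative, same cost).

def triggerWords : List String :=
  ["remember", "recall", "what happened", "did we", "when did", "who",
   "which project", "preference", "prefer", "last time", "my ", "our "]

-- ===== PORT A =====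
def should_retrieve (query : String) : Bool :=
  let lowered := PySem.Str.lower query
  triggerWords.any (fun marker => PySem.Str.isIn marker lowered)

-- ===== PORT B =====
-- the loop 'for i in range(len(lowered)+1): if lowered.startswith(w, i)' scans the suffixes of lowered
def scanB (ws : List (List Char)) : List Char → Bool
  | [] => ws.any (fun w => PySem.Chars.startswith [] w)
  | c :: t => ws.any (fun w => PySem.Chars.startswith (c :: t) w) || scanB ws t

-- '.split("|")': separator is the nonempty literal "|", so split? is always 'some'; getD [] is exact here
def triggerWordsB : List String :=
  (PySem.Str.split? ("remember|recall|what happened|did we|when did|who" ++ "|which project|preference|prefer|last time|my |our ") "|").getD []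

def should_retrieve_alt (query : String) : Bool :=
  scanB (triggerWordsB.map String.toList) (PySem.Str.lower query).toList

-- ===== PRECONDITION & SPEC =====
def Spec_should_retrieve (query : String) (out : Bool) : Prop := out = should_retrieve_alt query
instance (query : String) (out : Bool) : Decidable (Spec_should_retrieve query out) := by unfold Spec_should_retrieve; infer_instance

-- ===== CLAIM (what is proved, stated in full; the proofs are below) =====
def Claim_equal_should_retrieve : Prop := ∀ (query : String), Dom_should_retrieve query → Spec_should_retrieve query (should_retrieve query)

-- ===== LEMMAS AND PROOFS =====
theorem scanB_eq (ws : List (List Char)) (s : List Char) :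
    scanB ws s = ws.any (fun w => PySem.Chars.isIn w s) := by
  induction s with
  | nil =>
      rw [Bool.eq_iff_iff]
      simp [scanB, List.any_eq_true, PySem.Chars.startswith_iff, PySem.Chars.isIn_iff_infix]
  | cons c t ih =>
      rw [scanB, ih, Bool.eq_iff_iff]
      simp only [Bool.or_eq_true, List.any_eq_true, PySem.Chars.startswith_iff,
        PySem.Chars.isIn_iff_infix, List.infix_cons_iff]
      constructor
      · rintro (⟨x, hx, h⟩ | ⟨x, hx, h⟩) <;> exact ⟨x, hx, by tauto⟩
      · rintro ⟨x, hx, h | h⟩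
        · exact Or.inl ⟨x, hx, h⟩
        · exact Or.inr ⟨x, hx, h⟩

-- ===== VERDICT (by name: the statement is the Claim_ definition above) =====
theorem should_retrieve_spec : Claim_equal_should_retrieve := by
  intro query _
  unfold Spec_should_retrieve should_retrieve should_retrieve_alt
  have hw : triggerWordsB = triggerWords := by decide
  rw [scanB_eq, hw, Bool.eq_iff_iff]
  simp [List.any_eq_true]
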